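-- pv_equiv track=rewrite | github.com/saidniyr1943/CTI-110 | final_test_extra_python_study_guide.py | makeWordsFromColumns
-- ===== SOURCE A (Python) =====
-- def makeWordsFromColumns(letter_lists):
--     """Returns words built from matching columns."""
--     result = []
--
--     for col in range(len(letter_lists[0])):
--         word = ""
--
--         for row in range(len(letter_lists)):
--             word += letter_lists[row][col]
--
--         result.append(word)
--
--     return result
-- ===== SOURCE B (Python) =====
-- def makeWordsFromColumns(letter_lists):
--     """Returns words built from matching columns."""
--     parts = [[] for _ in range(len(letter_lists[0]))]
--
--     for row in range(len(letter_lists)):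
--         for col in range(len(parts)):
--             parts[col].append(letter_lists[row][col])
--
--     return ["".join(p) for p in parts]
-- ===== Notes on version B (the rewrite author's own statement) =====
-- stated objective: alternative
-- what changed: B builds all words simultaneously row-major (one char-list per column, appending one letter to every column's list per row, joined at the end) instead of A's column-major build that completes one word at a time with a full inner pass over the rows.
import Mathlib
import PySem

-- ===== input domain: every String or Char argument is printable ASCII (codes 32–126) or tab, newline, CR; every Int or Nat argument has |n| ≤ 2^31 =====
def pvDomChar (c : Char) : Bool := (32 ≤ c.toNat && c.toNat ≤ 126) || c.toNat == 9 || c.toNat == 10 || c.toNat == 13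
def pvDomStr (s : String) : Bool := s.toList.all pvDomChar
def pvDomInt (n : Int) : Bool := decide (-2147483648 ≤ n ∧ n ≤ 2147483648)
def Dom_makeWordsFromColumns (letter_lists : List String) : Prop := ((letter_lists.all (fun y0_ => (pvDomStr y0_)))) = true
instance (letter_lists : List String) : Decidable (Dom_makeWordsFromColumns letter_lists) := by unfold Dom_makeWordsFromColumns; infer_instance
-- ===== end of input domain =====

-- B builds all words simultaneously row-major instead of A's column-major one-word-per-pass build (alternative decomposition, same cost).
-- Words are accumulated as List Char and packed with String.ofList when stored (Lean's own String append is kernel-opaque); exact for the strings involved.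

-- ===== PORT A =====
def makeWordsFromColumns (letter_lists : List String) : List String :=
  -- result = []; for col in range(len(letter_lists[0])): word = ""; for row in range(len(letter_lists)): word += letter_lists[row][col]; result.append(word)
  (PySem.List.pyRange 0 (PySem.Str.len (PySem.List.pyGetD letter_lists 0 "")) 1).foldl
    (fun result col =>
      let word : List Char :=
        (PySem.List.pyRange 0 (letter_lists.length : Int) 1).foldl
          (fun word row =>
            word ++ [(PySem.Str.pyGet? (PySem.List.pyGetD letter_lists row "") col).getD ' ']) []
      result ++ [String.ofList word]) []

-- ===== PORT B =====
def makeWordsFromColumns_alt (letter_lists : List String) : List String :=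
  -- parts = [[] for _ in range(len(letter_lists[0]))]; for row in …: for col in …: parts[col].append(letter_lists[row][col]); return ["".join(p) for p in parts]
  let words : List (List Char) :=
    List.replicate (PySem.Str.len (PySem.List.pyGetD letter_lists 0 "")).toNat []
  let words :=
    (PySem.List.pyRange 0 (letter_lists.length : Int) 1).foldl
      (fun ws row =>
        (PySem.List.pyRange 0 (ws.length : Int) 1).foldl
          (fun ws col =>
            ws.set col.toNat
              ((ws.getD col.toNat []) ++
               [(PySem.Str.pyGet? (PySem.List.pyGetD letter_lists row "") col).getD ' ']))
          ws)
      words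
  words.map String.ofList

-- ===== PRECONDITION & SPEC =====
-- Pre_ excludes exactly the inputs on which Python A raises IndexError: the empty list
-- (letter_lists[0]) and ragged inputs where some row is shorter than the first row (letter_lists[row][col]).
def Pre_makeWordsFromColumns (letter_lists : List String) : Prop :=
  letter_lists ≠ [] ∧
  ∀ s ∈ letter_lists, PySem.Str.len (PySem.List.pyGetD letter_lists 0 "") ≤ PySem.Str.len s
instance (letter_lists : List String) : Decidable (Pre_makeWordsFromColumns letter_lists) := by
  unfold Pre_makeWordsFromColumns; infer_instance

def pvWitness_makeWordsFromColumns : List String := ["ab", "cd"]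

def Spec_makeWordsFromColumns (letter_lists : List String) (out : List String) : Prop := out = makeWordsFromColumns_alt letter_lists
instance (letter_lists : List String) (out : List String) : Decidable (Spec_makeWordsFromColumns letter_lists out) := by unfold Spec_makeWordsFromColumns; infer_instance

-- ===== CLAIM (what is proved, stated in full; the proofs are below) =====
def Claim_equal_makeWordsFromColumns : Prop := ∀ (letter_lists : List String), Dom_makeWordsFromColumns letter_lists → Pre_makeWordsFromColumns letter_lists → Spec_makeWordsFromColumns letter_lists (makeWordsFromColumns letter_lists)

-- ===== LEMMAS AND PROOFS =====

-- the character A and B both read at (row, col)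
def pvCh (ls : List String) (row col : Int) : Char :=
  (PySem.Str.pyGet? (PySem.List.pyGetD ls row "") col).getD ' '

-- index loop over a list, with Int casts, equals the structural fold
theorem pvInner {β : Type} (xs : List String) (d : String) (f : β → String → β) (init : β) :
    (List.range xs.length).foldl (fun acc k => f acc (PySem.List.pyGetD xs ((k : Nat) : Int) d)) init
      = xs.foldl f init := by
  rw [← PySem.List.foldl_pyRange_zero_pyGetD' xs d f init, PySem.List.pyRange_zero_nat,
    List.foldl_map]

-- A's result as a map over the column range
theorem pvA_eq_map (ls : List String) :
    makeWordsFromColumns ls =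
      (List.range (PySem.List.pyGetD ls 0 "").toList.length).map
        (fun (c : Nat) => String.ofList (ls.foldl (fun w s => w ++ [(PySem.Str.pyGet? s ((c : Nat) : Int)).getD ' ']) [])) := by
  unfold makeWordsFromColumns
  rw [PySem.List.foldl_append_singleton_eq_map]
  simp only [PySem.Str.len_eq, List.nil_append, PySem.List.pyRange_zero_nat, List.foldl_map,
    List.map_map]
  apply List.map_congr_left
  intro c hc
  simp only [Function.comp_apply]
  exact congrArg String.ofList
    (pvInner ls "" (fun w s => w ++ [(PySem.Str.pyGet? s (c : Int)).getD ' ']) [])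

-- updating every index in order maps a range-shaped list pointwise
theorem pvSet_map_range {α : Type} (g : Nat → α) (m n : Nat) (v : α) :
    ((List.range m).map g).set n v = (List.range m).map (fun c => if c = n then v else g c) := by
  apply List.ext_getElem
  · simp
  · intro i h1 h2
    simp only [List.getElem_set, List.getElem_map, List.getElem_range]
    simp at h1
    by_cases hi : i = n
    · simp [hi]
    · simp only [hi, if_false]
      simp
      exact fun h => absurd h.symm hi

theorem pvRowStep {α : Type} (f : Nat → α → α) (d : α) (h : Nat → α) (m : Nat) :
    ∀ n, n ≤ m →
      (List.range n).foldl (fun acc col => acc.set col (f col (acc.getD col d))) ((List.range m).map h)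
        = (List.range m).map (fun c => if c < n then f c (h c) else h c) := by
  intro n
  induction n with
  | zero => intro _; simp
  | succ k ih =>
    intro hk
    rw [List.range_succ, List.foldl_append, ih (by omega)]
    simp only [List.foldl_cons, List.foldl_nil]
    have hget : ((List.range m).map (fun c => if c < k then f c (h c) else h c)).getD k d = h k := by
      rw [List.getD_eq_getElem?_getD]
      simp [Nat.lt_of_succ_le hk]
    rw [hget, pvSet_map_range]
    apply List.map_congr_left
    intro c hc
    by_cases h1 : c = k
    · simp [h1]
    · by_cases h2 : c < k <;> simp [h1, h2] <;> omega

-- B's fold over the rows, generalized over the current per-column accumulations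
theorem pvB_rows (ls : List String) (rows : List Int) (n : Nat) (h : Nat → List Char) :
    rows.foldl
      (fun ws row =>
        (PySem.List.pyRange 0 (ws.length : Int) 1).foldl
          (fun ws col => ws.set col.toNat ((ws.getD col.toNat []) ++ [pvCh ls row col])) ws)
      ((List.range n).map h)
      = (List.range n).map (fun (c : Nat) => rows.foldl (fun w row => w ++ [pvCh ls row (c : Int)]) (h c)) := by
  induction rows generalizing h with
  | nil => simp
  | cons r rs ih =>
    simp only [List.foldl_cons]
    have hlen : ((((List.range n).map h).length : Nat) : Int) = (n : Int) := by simp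
    rw [hlen, PySem.List.pyRange_one]
    simp only [Int.sub_zero, Int.toNat_natCast, List.foldl_map, zero_add]
    rw [pvRowStep (fun c w => w ++ [pvCh ls r (c : Int)]) [] h n n (le_refl n)]
    have hmap : ((List.range n).map fun c => if c < n then h c ++ [pvCh ls r (c : Int)] else h c)
        = (List.range n).map fun c => h c ++ [pvCh ls r (c : Int)] := by
      apply List.map_congr_left
      intro c hc
      simp [List.mem_range.mp hc]
    rw [hmap, ih (fun c => h c ++ [pvCh ls r (c : Int)])]

-- ===== VERDICT (by name: the statement is the Claim_ definition above) =====
theorem makeWordsFromColumns_spec : Claim_equal_makeWordsFromColumns := by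
  intro ls _ _
  unfold Spec_makeWordsFromColumns
  rw [pvA_eq_map]
  simp only [makeWordsFromColumns_alt]
  have hrep : List.replicate (PySem.Str.len (PySem.List.pyGetD ls 0 "")).toNat ([] : List Char)
      = (List.range (PySem.Str.len (PySem.List.pyGetD ls 0 "")).toNat).map
          (fun _ => ([] : List Char)) := by
    simp [List.map_const']
  have hB := pvB_rows ls (PySem.List.pyRange 0 (ls.length : Int) 1)
      (PySem.Str.len (PySem.List.pyGetD ls 0 "")).toNat (fun _ => ([] : List Char))
  simp only [pvCh] at hB
  rw [hrep, hB, List.map_map]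
  simp only [PySem.Str.len_eq, Int.toNat_natCast]
  apply List.map_congr_left
  intro c hc
  simp only [Function.comp_apply]
  rw [PySem.List.foldl_pyRange_zero_pyGetD' ls ""
    (fun w s => w ++ [(PySem.Str.pyGet? s ((c : Nat) : Int)).getD ' ']) []]
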